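-- pv_equiv track=rewrite | github.com/kgryczan/excelbi_puzzles | Excel/800-899/891/891 Challenge.py | find_square_pairs
-- ===== SOURCE A (Python) =====
-- import math
-- from itertools import product
--
-- def find_square_pairs(n):
--     limit = math.isqrt(n)
--     pairs = [
--         f"{i}-{j}"
--         for i, j in product(range(limit + 1), repeat=2)
--         if i <= j and i**2 + j**2 == n
--     ]
--     return ", ".join(pairs) if pairs else "No"
-- ===== SOURCE B (Python) =====
-- import math
--
-- def find_square_pairs(n):
--     pairs = []
--     for i in range(math.isqrt(n // 2) + 1):
--         r = n - i * i
--         s = math.isqrt(r)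
--         if s * s == r:
--             pairs.append(f"{i}-{s}")
--     return ", ".join(pairs) if pairs else "No"
-- ===== Notes on version B (the rewrite author's own statement) =====
-- stated objective: faster
-- what changed: Instead of scanning all (isqrt(n)+1)^2 pairs (i,j) and testing i^2+j^2==n, B loops i only up to isqrt(n//2) and checks whether n-i^2 is a perfect square via isqrt, so the inner scan over j disappears.
import Mathlib
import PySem

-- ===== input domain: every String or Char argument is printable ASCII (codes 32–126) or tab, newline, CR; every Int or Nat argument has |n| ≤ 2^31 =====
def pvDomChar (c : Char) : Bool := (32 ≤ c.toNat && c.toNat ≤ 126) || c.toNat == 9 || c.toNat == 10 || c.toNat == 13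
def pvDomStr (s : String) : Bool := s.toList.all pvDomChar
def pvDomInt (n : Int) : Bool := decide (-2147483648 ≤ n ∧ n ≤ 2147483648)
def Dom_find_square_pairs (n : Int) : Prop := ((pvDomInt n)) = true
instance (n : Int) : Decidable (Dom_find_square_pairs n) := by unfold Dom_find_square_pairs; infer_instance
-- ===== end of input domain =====

-- B replaces A's O(n) scan over all pairs (i,j) up to isqrt(n) by a single loop of i up to
-- isqrt(n//2) with a perfect-square test on n-i^2 (objective: faster, asymptotic).

-- math.isqrt for nonnegative arguments (exact on the Pre_ domain; Python raises on negative arguments).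
def pvISqrt (r : Int) : Int := (Nat.sqrt r.toNat : Int)

-- ===== PORT A =====
def find_square_pairs (n : Int) : String :=
  let limit := pvISqrt n
  let pairs : List String :=
    (PySem.List.pyRange 0 (limit + 1) 1).flatMap (fun i =>
      (PySem.List.pyRange 0 (limit + 1) 1).filterMap (fun j =>
        if i ≤ j ∧ i ^ 2 + j ^ 2 = n then
          some (PySem.Int.toStr i ++ "-" ++ PySem.Int.toStr j)
        else none))
  if pairs = [] then "No" else PySem.Str.join ", " pairs

-- ===== PORT B =====
def find_square_pairs_alt (n : Int) : String :=
  let pairs : List String :=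
    (PySem.List.pyRange 0 (pvISqrt (PySem.Int.floordiv n 2) + 1) 1).foldl
      (fun acc i =>
        let r := n - i * i
        let s := pvISqrt r
        if s * s = r then acc ++ [PySem.Int.toStr i ++ "-" ++ PySem.Int.toStr s] else acc) []
  if pairs = [] then "No" else PySem.Str.join ", " pairs

-- ===== PRECONDITION & SPEC =====
-- Pre_ excludes negative n, where math.isqrt raises ValueError in A (and in B alike).
def Pre_find_square_pairs (n : Int) : Prop := 0 ≤ n
instance (n : Int) : Decidable (Pre_find_square_pairs n) := by unfold Pre_find_square_pairs; infer_instance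
def pvWitness_find_square_pairs : Int := (25)

def Spec_find_square_pairs (n : Int) (out : String) : Prop := out = find_square_pairs_alt n
instance (n : Int) (out : String) : Decidable (Spec_find_square_pairs n out) := by unfold Spec_find_square_pairs; infer_instance

-- ===== CLAIM (what is proved, stated in full; the proofs are below) =====
def Claim_equal_find_square_pairs : Prop := ∀ (n : Int), Dom_find_square_pairs n → Pre_find_square_pairs n → Spec_find_square_pairs n (find_square_pairs n)

-- ===== LEMMAS AND PROOFS =====

theorem pvISqrt_nonneg (r : Int) : 0 ≤ pvISqrt r := by
  unfold pvISqrt; exact Int.natCast_nonneg _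

theorem le_pvISqrt (a r : Int) (ha : 0 ≤ a) (h : a * a ≤ r) : a ≤ pvISqrt r := by
  unfold pvISqrt
  have hr : 0 ≤ r := le_trans (mul_self_nonneg a) h
  have : a.toNat ≤ Nat.sqrt r.toNat := by
    rw [Nat.le_sqrt', pow_two]
    have : (a.toNat * a.toNat : Int) ≤ (r.toNat : Int) := by
      push_cast; rw [Int.toNat_of_nonneg ha, Int.toNat_of_nonneg hr]; exact h
    exact_mod_cast this
  omega

theorem pvISqrt_of_sq (j : Int) (hj : 0 ≤ j) : pvISqrt (j * j) = j := by
  unfold pvISqrt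
  have hc : (j.toNat : Int) = j := Int.toNat_of_nonneg hj
  have h1 : (j * j).toNat = j.toNat ^ 2 := by
    have h3 : ((j.toNat * j.toNat : Nat) : Int) = j * j := by rw [Int.natCast_mul, hc]
    rw [pow_two]; omega
  rw [h1, Nat.sqrt_eq']
  exact hc

theorem sq_lt_sq_of_lt (a b : Int) (ha : 0 ≤ a) (h : a < b) : a * a < b * b := by
  nlinarith

-- list helpers used only by the proofs
theorem my_flatMap_congr {α β : Type} (l : List α) (f g : α → List β)
    (h : ∀ x ∈ l, f x = g x) : l.flatMap f = l.flatMap g := by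
  induction l with
  | nil => rfl
  | cons a t ih =>
    simp only [List.flatMap_cons]
    rw [h a (by simp), ih (fun x hx => h x (by simp [hx]))]

theorem flatMap_ite_eq_map_filter {α β : Type} (l : List α) (p : α → Prop) [DecidablePred p]
    (f : α → β) :
    l.flatMap (fun x => if p x then [f x] else []) = (l.filter (fun x => decide (p x))).map f := by
  induction l with
  | nil => rfl
  | cons a t ih =>
    simp only [List.flatMap_cons, List.filter_cons]
    by_cases h : p a <;> simp [h, ih]

-- the range bounds: i ≤ isqrt(n//2) ↔ 2*i*i ≤ n (for 0 ≤ i, 0 ≤ n)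
theorem fd_eq (n : Int) (hn : 0 ≤ n) : (PySem.Int.floordiv n 2).toNat = n.toNat / 2 := by
  rw [PySem.Int.floordiv_eq_ediv_of_pos (by norm_num)]
  omega

theorem le_L2_of (n i : Int) (hn : 0 ≤ n) (hi : 0 ≤ i)
    (h : i ≤ pvISqrt (PySem.Int.floordiv n 2)) : 2 * (i * i) ≤ n := by
  unfold pvISqrt at h
  rw [fd_eq n hn] at h
  have hi' : i.toNat ≤ Nat.sqrt (n.toNat / 2) := by omega
  have := (Nat.le_sqrt'.mp hi')
  rw [pow_two] at this
  have hcast : (i.toNat : Int) = i := Int.toNat_of_nonneg hi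
  have h2 : (i.toNat * i.toNat : Int) ≤ ((n.toNat / 2 : Nat) : Int) := by exact_mod_cast this
  rw [hcast] at h2
  omega

theorem gt_L2_of (n i : Int) (hn : 0 ≤ n) (hi : 0 ≤ i)
    (h : pvISqrt (PySem.Int.floordiv n 2) < i) : n < 2 * (i * i) := by
  unfold pvISqrt at h
  rw [fd_eq n hn] at h
  have hi' : Nat.sqrt (n.toNat / 2) < i.toNat := by omega
  have := Nat.sqrt_lt'.mp hi'
  rw [pow_two] at this
  have hcast : (i.toNat : Int) = i := Int.toNat_of_nonneg hi
  have h2 : ((n.toNat / 2 : Nat) : Int) < (i.toNat * i.toNat : Int) := by exact_mod_cast this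
  rw [hcast] at h2
  omega

-- per-i: A's inner scan over j collapses to B's perfect-square test (abstract in the output f)
theorem inner_eq {β : Type} (n i : Int) (f : Int → Int → β)
    (hn : 0 ≤ n) (hi : 0 ≤ i) (h2 : 2 * (i * i) ≤ n) :
    (PySem.List.pyRange 0 (pvISqrt n + 1) 1).filterMap (fun j =>
        if i ≤ j ∧ i ^ 2 + j ^ 2 = n then some (f i j) else none)
    = if pvISqrt (n - i * i) * pvISqrt (n - i * i) = n - i * i
      then [f i (pvISqrt (n - i * i))] else [] := by
  have hii : 0 ≤ i * i := mul_self_nonneg i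
  have hr : 0 ≤ n - i * i := by omega
  set r := n - i * i with hrdef
  set s := pvISqrt r with hsdef
  have hs0 : 0 ≤ s := pvISqrt_nonneg r
  by_cases hsq : s * s = r
  · -- r is a perfect square: exactly one j (= s) passes A's test
    rw [if_pos hsq]
    have his : i ≤ s := by
      by_contra hc
      push_neg at hc
      have := sq_lt_sq_of_lt s i hs0 hc
      omega
    have hsL : s ≤ pvISqrt n := le_pvISqrt s n hs0 (by omega)
    have key : ∀ j : Int, ((i ≤ j ∧ i ^ 2 + j ^ 2 = n) ↔ j = s) := by
      intro j
      constructor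
      · rintro ⟨hij, heq⟩
        have hj0 : 0 ≤ j := le_trans hi hij
        have hjj : j * j = s * s := by rw [pow_two, pow_two] at heq; omega
        by_contra hne
        rcases lt_or_gt_of_ne hne with hlt | hgt
        · have := sq_lt_sq_of_lt j s hj0 hlt; omega
        · have := sq_lt_sq_of_lt s j hs0 hgt; omega
      · rintro rfl
        exact ⟨his, by rw [pow_two, pow_two]; omega⟩
    have hsplit := PySem.List.pyRange_one_append 0 s (pvISqrt n + 1) hs0 (by omega)
    rw [hsplit, PySem.List.pyRange_one_cons (a := s) (by omega), List.filterMap_append,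
      List.filterMap_cons]
    have hlow : (PySem.List.pyRange 0 s 1).filterMap (fun j =>
        if i ≤ j ∧ i ^ 2 + j ^ 2 = n then some (f i j) else none) = [] := by
      rw [List.filterMap_eq_nil_iff]
      intro j hj
      rw [PySem.List.mem_pyRange_one] at hj
      rw [if_neg]
      intro hc
      have := (key j).mp hc
      omega
    have hhigh : (PySem.List.pyRange (s + 1) (pvISqrt n + 1) 1).filterMap (fun j =>
        if i ≤ j ∧ i ^ 2 + j ^ 2 = n then some (f i j) else none) = [] := by
      rw [List.filterMap_eq_nil_iff]
      intro j hj
      rw [PySem.List.mem_pyRange_one] at hj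
      rw [if_neg]
      intro hc
      have := (key j).mp hc
      omega
    rw [hlow]
    simp only [if_pos ((key s).mpr rfl), hhigh]
    rfl
  · -- r is not a perfect square: no j passes
    rw [if_neg hsq, List.filterMap_eq_nil_iff]
    intro j hj
    rw [if_neg]
    rintro ⟨hij, heq⟩
    have hj0 : 0 ≤ j := le_trans hi hij
    have hjj : j * j = r := by rw [pow_two, pow_two] at heq; omega
    have : pvISqrt (j * j) = j := pvISqrt_of_sq j hj0
    rw [hjj] at this
    rw [hsdef] at hsq
    rw [this] at hsq
    exact hsq hjj

-- the two pairs lists are equal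
theorem pairs_eq (n : Int) (hn : 0 ≤ n) :
    (PySem.List.pyRange 0 (pvISqrt n + 1) 1).flatMap (fun i =>
      (PySem.List.pyRange 0 (pvISqrt n + 1) 1).filterMap (fun j =>
        if i ≤ j ∧ i ^ 2 + j ^ 2 = n then
          some (PySem.Int.toStr i ++ "-" ++ PySem.Int.toStr j)
        else none))
    = (PySem.List.pyRange 0 (pvISqrt (PySem.Int.floordiv n 2) + 1) 1).foldl
        (fun acc i =>
          if pvISqrt (n - i * i) * pvISqrt (n - i * i) = n - i * i
          then acc ++ [PySem.Int.toStr i ++ "-" ++ PySem.Int.toStr (pvISqrt (n - i * i))]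
          else acc) [] := by
  set L2 := pvISqrt (PySem.Int.floordiv n 2) with hL2
  have hL20 : 0 ≤ L2 := pvISqrt_nonneg _
  have hL2L : L2 + 1 ≤ pvISqrt n + 1 := by
    have h1 : L2 ≤ pvISqrt n := by
      rw [hL2]
      unfold pvISqrt
      have h2 : (PySem.Int.floordiv n 2).toNat ≤ n.toNat := by rw [fd_eq n hn]; omega
      exact_mod_cast Nat.sqrt_le_sqrt h2
    omega
  rw [PySem.List.foldl_append_ite
        (p := fun i => pvISqrt (n - i * i) * pvISqrt (n - i * i) = n - i * i)
        (f := fun i => PySem.Int.toStr i ++ "-" ++ PySem.Int.toStr (pvISqrt (n - i * i)))]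
  set F : Int → List String := fun i =>
    (PySem.List.pyRange 0 (pvISqrt n + 1) 1).filterMap (fun j =>
      if i ≤ j ∧ i ^ 2 + j ^ 2 = n then
        some (PySem.Int.toStr i ++ "-" ++ PySem.Int.toStr j)
      else none) with hF
  rw [PySem.List.pyRange_one_append 0 (L2 + 1) (pvISqrt n + 1) (by omega) hL2L,
    List.flatMap_append]
  have hhigh : (PySem.List.pyRange (L2 + 1) (pvISqrt n + 1) 1).flatMap F = [] := by
    rw [List.flatMap_eq_nil_iff]
    intro i hi
    rw [PySem.List.mem_pyRange_one] at hi
    have hi0 : 0 ≤ i := by omega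
    have hbig : n < 2 * (i * i) := gt_L2_of n i hn hi0 (by omega)
    simp only [hF]
    rw [List.filterMap_eq_nil_iff]
    intro j hj
    rw [PySem.List.mem_pyRange_one] at hj
    rw [if_neg]
    rintro ⟨hij, heq⟩
    have : i * i ≤ j * j := by
      have := mul_self_le_mul_self hi0 hij
      omega
    rw [pow_two, pow_two] at heq
    omega
  rw [hhigh, List.append_nil]
  rw [my_flatMap_congr (PySem.List.pyRange 0 (L2 + 1) 1) F
        (fun i => if pvISqrt (n - i * i) * pvISqrt (n - i * i) = n - i * i
          then [PySem.Int.toStr i ++ "-" ++ PySem.Int.toStr (pvISqrt (n - i * i))] else [])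
        (by
          intro i hi
          rw [PySem.List.mem_pyRange_one] at hi
          simp only [hF]
          exact inner_eq n i (fun a b => PySem.Int.toStr a ++ "-" ++ PySem.Int.toStr b)
            hn hi.1 (le_L2_of n i hn hi.1 (by omega)))]
  exact flatMap_ite_eq_map_filter _ _ _

-- ===== VERDICT (by name: the statement is the Claim_ definition above) =====
theorem find_square_pairs_spec : Claim_equal_find_square_pairs := by
  intro n _ hpre
  unfold Spec_find_square_pairs find_square_pairs find_square_pairs_alt
  simp only []
  rw [pairs_eq n hpre]
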